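-- pv_equiv track=rewrite | github.com/UMBC-MeetingMayhem/MeetingMayhem | MeetingMayhem/helper.py | check_for_str
-- ===== SOURCE A (Python) =====
-- def check_for_str(str, check):
--     """Recursivley parse a string for usernames to find the username passed.
--     This is used to detect when a user is a recipient of a message.
--     Args:
--         str (str): the string that contains usernames
--         check (str): the username we are looking for
--     Returns:
--         bool: True if the username we are looking for is found.
--
--     Todo:
--         Rename check to something better.
--     """
--     if str: #check if the passed string is empty or not
--         str1=str.partition(', ') #split the string into the username, the "', ", and the rest of the string
--         if (str1[0] == check): #if the first part of str is the username we are looking for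
--             return True
--         if (not str1[2]): #if there is nothing in the rest of str, it means there are no more usernames to look for
--             return False
--         else:
--             return check_for_str(str1[2], check) #call this method again if there is more string to look through
--     else: #if the passed string is empty, return false
--         return False
-- ===== SOURCE B (Python) =====
-- def check_for_str(str, check):
--     """Single-pass re-implementation: split the string on ', ' and test
--     membership; a trailing separator introduces no username, so its empty
--     last piece is dropped."""
--     if not str:
--         return False
--     parts = str.split(', ')
--     if str.endswith(', '):
--         parts.pop()
--     return check in parts
-- ===== Notes on version B (the rewrite author's own statement) =====
-- stated objective: simpler
-- what changed: Replaced the head-recursive partition(', ') scan with a single split(', ') plus list membership (dropping the empty piece a trailing separator leaves), removing the recursion entirely.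
import Mathlib
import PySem

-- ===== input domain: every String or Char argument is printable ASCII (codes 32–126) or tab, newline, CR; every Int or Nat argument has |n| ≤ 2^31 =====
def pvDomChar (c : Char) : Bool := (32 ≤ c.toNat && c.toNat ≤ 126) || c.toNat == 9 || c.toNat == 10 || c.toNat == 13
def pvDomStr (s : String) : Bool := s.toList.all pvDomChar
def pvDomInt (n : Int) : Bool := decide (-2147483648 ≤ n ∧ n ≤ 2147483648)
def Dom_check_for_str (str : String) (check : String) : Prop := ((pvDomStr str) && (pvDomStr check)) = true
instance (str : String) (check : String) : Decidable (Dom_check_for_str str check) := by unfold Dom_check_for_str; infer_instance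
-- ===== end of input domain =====

-- B is 'simpler': one split(', ') plus list membership instead of A's head recursion on partition(', '); return values proved equal on all inputs.

-- the separator ', ' both Pythons work with
def pySep : List Char := [',', ' ']

-- ===== PORT A =====
-- Python s.partition(', ') as the triple (head, matched separator or '', rest), scanning left to right (exact)
def pypartition : List Char → List Char × List Char × List Char
  | [] => ([], [], [])
  | c :: rest =>
    if pySep.isPrefixOf (c :: rest) then ([], pySep, rest.tail)
    else
      let p := pypartition rest
      (c :: p.1, p.2.1, p.2.2)

-- the rest returned by pypartition is shorter than its input (termination of A's recursion)
theorem pypartition_r_lt : ∀ l : List Char, l ≠ [] → ((pypartition l).2.2).length < l.length := by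
  intro l h
  induction l with
  | nil => simp at h
  | cons c rest ih =>
    simp only [pypartition]
    split
    · cases rest <;> simp
    · cases rest with
      | nil => simp [pypartition]
      | cons d t => exact Nat.lt_trans (ih (by simp)) (by simp)

def goA (check : List Char) : List Char → Bool
  | [] => false
  | c :: rest =>
    let p := pypartition (c :: rest)
    if p.1 == check then true
    else if p.2.2 == [] then false
    else goA check p.2.2
  termination_by l => l.length
  decreasing_by
    exact pypartition_r_lt (c :: rest) (by simp)

def check_for_str (str : String) (check : String) : Bool :=
  goA check.toList str.toList

-- ===== PORT B =====
def check_for_str_alt (str : String) (check : String) : Bool :=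
  if str.toList = [] then false
  else
    let parts := PySem.Chars.splitOn str.toList pySep
    let parts := if PySem.Chars.endswith str.toList pySep then parts.dropLast else parts
    parts.contains check.toList

-- ===== PRECONDITION & SPEC =====
def Spec_check_for_str (str : String) (check : String) (out : Bool) : Prop := out = check_for_str_alt str check
instance (str : String) (check : String) (out : Bool) : Decidable (Spec_check_for_str str check out) := by unfold Spec_check_for_str; infer_instance

-- ===== CLAIM (what is proved, stated in full; the proofs are below) =====
def Claim_equal_check_for_str : Prop := ∀ (str : String) (check : String), Dom_check_for_str str check → Spec_check_for_str str check (check_for_str str check)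

-- ===== LEMMAS AND PROOFS =====

-- no separator found: the head is the whole string and the rest is empty
theorem pypartition_none : ∀ l : List Char, (pypartition l).2.1 = [] →
    (pypartition l).1 = l ∧ (pypartition l).2.2 = [] := by
  intro l
  induction l with
  | nil => simp [pypartition]
  | cons c rest ih =>
    simp only [pypartition]
    split
    · simp [pySep]
    · intro h
      obtain ⟨h1, h2⟩ := ih h
      simp [h1, h2]

-- separator found: the input decomposes as head ++ ', ' ++ rest
theorem pypartition_some : ∀ l : List Char, (pypartition l).2.1 ≠ [] →
    (pypartition l).2.1 = pySep ∧ l = (pypartition l).1 ++ pySep ++ (pypartition l).2.2 := by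
  intro l
  induction l with
  | nil => simp [pypartition]
  | cons c rest ih =>
    simp only [pypartition]
    split
    · rename_i hp
      refine fun _ => ⟨rfl, ?_⟩
      obtain ⟨t, ht⟩ := List.isPrefixOf_iff_prefix.mp hp
      simp only [pySep, List.cons_append, List.nil_append, List.cons.injEq] at ht ⊢
      obtain ⟨hc, hr⟩ := ht
      subst hc hr
      simp
    · intro h
      obtain ⟨h1, h2⟩ := ih h
      simp only [h1, true_and]
      conv_lhs => rw [h2]
      simp

-- if no separator occurs, the string does not end with one
theorem not_endswith_of_none : ∀ l : List Char, (pypartition l).2.1 = [] →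
    ¬ pySep <:+ l := by
  intro l
  induction l with
  | nil => intro _ hs; have := hs.length_le; simp [pySep] at this
  | cons c rest ih =>
    simp only [pypartition]
    split
    · simp [pySep]
    · rename_i hp
      intro h hs
      rcases List.suffix_cons_iff.mp hs with heq | hsuf
      · exact hp (heq ▸ List.isPrefixOf_iff_prefix.mpr (List.prefix_refl _))
      · exact ih h hsuf

-- with a nonempty rest, ending with ', ' transfers across 'head ++ \", \" ++ rest'
theorem endswith_shift (x r : List Char) (hr : r ≠ []) :
    (pySep <:+ (x ++ pySep ++ r)) ↔ pySep <:+ r := by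
  rw [← List.reverse_prefix, ← List.reverse_prefix]
  rcases List.eq_nil_or_concat r with h | ⟨r', a, h⟩
  · exact absurd h hr
  subst h
  rcases List.eq_nil_or_concat r' with h | ⟨r'', b, h⟩
  · subst h
    simp [pySep, List.cons_prefix_cons]
  · subst h
    simp [pySep, List.cons_prefix_cons]

-- proof-side: the segment list str.split(', ') computed by the same left-to-right partition recursion
def segs (l : List Char) : List (List Char) :=
  let p := pypartition l
  if _h : p.2.1 = [] then [l] else p.1 :: segs p.2.2
  termination_by l.length
  decreasing_by
    refine pypartition_r_lt l (fun hl => ?_)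
    subst hl
    exact _h rfl

theorem segs_ne_nil (l : List Char) : segs l ≠ [] := by
  rw [segs.eq_def]; dsimp only; split <;> simp

-- head of a segment list (kept abstract so simp does not normalise it away)
def segHead (xs : List (List Char)) : List Char := xs.headD []

theorem segs_headD_tail (m : List Char) : segHead (segs m) :: (segs m).tail = segs m := by
  cases h : segs m with
  | nil => exact absurd h (segs_ne_nil m)
  | cons a t => simp [segHead]

-- a non-matching leading character moves into the first segment
theorem segs_cons_shift (c : Char) (rest : List Char)
    (hnp : ¬ pySep.isPrefixOf (c :: rest) = true) :
    segHead (segs (c :: rest)) = c :: segHead (segs rest) ∧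
      (segs (c :: rest)).tail = (segs rest).tail := by
  rw [segs.eq_def, segs.eq_def (l := rest)]
  dsimp only
  have hp : pypartition (c :: rest)
      = (c :: (pypartition rest).1, (pypartition rest).2.1, (pypartition rest).2.2) := by
    rw [pypartition]; rw [if_neg hnp]
  rw [hp]
  by_cases hs : (pypartition rest).2.1 = []
  · obtain ⟨h1, _⟩ := pypartition_none rest hs
    simp [hs, segHead]
  · simp [hs, segHead]

-- main invariant: A's recursion computes membership in the segment list, trimmed of the
-- empty last segment a trailing separator leaves
theorem goA_eq_segs (check : List Char) : ∀ l : List Char, l ≠ [] →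
    goA check l = (if pySep <:+ l then (segs l).dropLast else segs l).contains check := by
  intro l
  induction hn : l.length using Nat.strong_induction_on generalizing l with
  | _ n ih =>
  intro hl
  cases l with
  | nil => exact absurd rfl hl
  | cons c rest =>
  rw [goA, segs.eq_def]
  dsimp only
  by_cases hfound : (pypartition (c :: rest)).2.1 = []
  · obtain ⟨h1, h2⟩ := pypartition_none _ hfound
    have hns := not_endswith_of_none _ hfound
    rw [if_neg hns, dif_pos hfound]
    simp [h1, h2]
    exact eq_comm
  · obtain ⟨hsep, hdec⟩ := pypartition_some _ hfound
    simp only [dif_neg hfound]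
    by_cases hr : (pypartition (c :: rest)).2.2 = []
    · have hsuf : pySep <:+ (c :: rest) := by
        conv_rhs => rw [hdec, hr]
        simp
      rw [if_pos hsuf]
      have hsegnil : segs ([] : List Char) = [[]] := by
        rw [segs.eq_def]; simp [pypartition]
      simp [hsegnil, hr]
      exact eq_comm
    · have hsuf : (pySep <:+ (c :: rest)) ↔ pySep <:+ (pypartition (c :: rest)).2.2 := by
        conv_lhs => rw [hdec]
        exact endswith_shift _ _ hr
      have hlt : (pypartition (c :: rest)).2.2.length < n := hn ▸ pypartition_r_lt (c :: rest) hl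
      have ihr := ih _ hlt _ rfl hr
      by_cases hends : pySep <:+ (pypartition (c :: rest)).2.2
      · rw [if_pos (hsuf.mpr hends), if_pos hends] at *
        rw [List.dropLast_cons_of_ne_nil (segs_ne_nil _)]
        by_cases hb : (pypartition (c :: rest)).1 = check
        · simp [hb]
        · simp [hb, Ne.symm hb, hr, ihr]
      · rw [if_neg (fun hx => hends (hsuf.mp hx)), if_neg hends] at *
        by_cases hb : (pypartition (c :: rest)).1 = check
        · simp [hb]
        · simp [hb, Ne.symm hb, hr, ihr]

-- PySem's splitOn worker, with enough fuel, produces the same segment list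
theorem splitOn_go_eq : ∀ (fuel : Nat) (l cur : List Char) (acc : List (List Char)),
    l.length < fuel →
    PySem.Chars.splitOn.go pySep fuel l cur acc =
      acc.reverse ++ (cur.reverse ++ segHead (segs l)) :: (segs l).tail := by
  intro fuel
  induction fuel with
  | zero => intro l cur acc h; omega
  | succ f ihf =>
    intro l cur acc h
    cases l with
    | nil =>
      have hs : segs ([] : List Char) = [[]] := by rw [segs.eq_def]; simp [pypartition]
      simp [PySem.Chars.splitOn.go, hs, segHead]
    | cons c rest =>
      rw [PySem.Chars.splitOn.go]
      by_cases hnp : pySep.isPrefixOf (c :: rest) = true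
      · rw [if_pos hnp]
        have hdrop : List.drop pySep.length (c :: rest) = rest.tail := by
          simp [pySep, List.drop_succ_cons, List.drop_one]
        have hlen : (List.drop pySep.length (c :: rest)).length < f := by
          simp [pySep] at *; omega
        rw [ihf _ _ _ hlen, hdrop]
        have hseg : segs (c :: rest) = [] :: segs rest.tail := by
          rw [segs.eq_def]
          dsimp only
          have hp : pypartition (c :: rest) = ([], pySep, rest.tail) := by
            rw [pypartition, if_pos hnp]
          rw [hp]
          simp [pySep]
        rw [hseg]
        simp only [List.reverse_cons, List.reverse_nil, List.nil_append, List.append_assoc]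
        rw [segs_headD_tail]
        simp [segHead]
      · rw [if_neg hnp]
        have hlen : rest.length < f := by simp at h; omega
        rw [ihf _ _ _ hlen]
        obtain ⟨hh, ht⟩ := segs_cons_shift c rest hnp
        rw [hh, ht]
        simp

theorem splitOn_eq_segs (l : List Char) : PySem.Chars.splitOn l pySep = segs l := by
  rw [PySem.Chars.splitOn, splitOn_go_eq (l.length + 1) l [] [] (by omega)]
  simp only [List.reverse_nil, List.nil_append]
  rw [segs_headD_tail]

-- ===== VERDICT (by name: the statement is the Claim_ definition above) =====
theorem check_for_str_spec : Claim_equal_check_for_str := by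
  intro str check _
  unfold Spec_check_for_str check_for_str check_for_str_alt
  by_cases h : str.toList = []
  · rw [if_pos h, h, goA]
  · rw [if_neg h]
    dsimp only
    rw [splitOn_eq_segs, goA_eq_segs check.toList _ h]
    congr 1
    refine if_congr ?_ rfl rfl
    simp [PySem.Chars.endswith, List.isSuffixOf_iff_suffix]
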